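-- pv_equiv track=rewrite | github.com/madhulikamukherjee/survaider-app | survaider/survey/controller.py | average_for_all_channels
-- ===== SOURCE A (Python) =====
-- def average_for_all_channels(all_channel_data):
--     overall = {}
--
--     for channel in all_channel_data:
--         channel_data = all_channel_data[channel]
--         for aspect in channel_data:
--             if aspect not in overall:
--                 overall[aspect] = channel_data[aspect]
--             else:
--                 overall[aspect] += channel_data[aspect]
--     return overall
-- ===== SOURCE B (Python) =====
-- def average_for_all_channels(all_channel_data):
--     # aspect-outer decomposition: collect aspects in first-seen order, then sum each over channels
--     channels = list(all_channel_data.values())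
--     aspects = dict.fromkeys(a for channel_data in channels for a in channel_data)
--     return {
--         a: sum(channel_data[a] for channel_data in channels if a in channel_data)
--         for a in aspects
--     }
-- ===== Notes on version B (the rewrite author's own statement) =====
-- stated objective: alternative
-- what changed: Inverted the nested loop: instead of channel-outer accumulation into a dict, B first collects all aspects in first-seen order and then builds the result as a dict comprehension summing each aspect's values over the channels that contain it.
import Mathlib
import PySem

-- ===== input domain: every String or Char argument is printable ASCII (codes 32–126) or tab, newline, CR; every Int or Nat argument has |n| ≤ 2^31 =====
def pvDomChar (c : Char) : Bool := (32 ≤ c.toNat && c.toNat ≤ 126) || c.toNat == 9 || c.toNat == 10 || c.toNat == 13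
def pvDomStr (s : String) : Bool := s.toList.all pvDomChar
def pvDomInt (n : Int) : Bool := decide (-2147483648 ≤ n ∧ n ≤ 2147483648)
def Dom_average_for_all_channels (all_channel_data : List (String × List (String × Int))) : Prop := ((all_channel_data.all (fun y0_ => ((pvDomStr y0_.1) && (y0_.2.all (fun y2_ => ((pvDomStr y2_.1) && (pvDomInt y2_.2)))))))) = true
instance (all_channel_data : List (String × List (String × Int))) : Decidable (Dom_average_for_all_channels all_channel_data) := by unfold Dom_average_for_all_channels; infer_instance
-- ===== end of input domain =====

-- B inverts A's nested loop (aspect-outer grouping instead of channel-outer accumulation); same cost, different decomposition; return value only.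

-- ===== PORT A =====
-- inner-loop body: 'if aspect not in overall: overall[aspect] = v else: overall[aspect] += v'
def pvStepA (ov : PySem.Dict String Int) (p : String × Int) : PySem.Dict String Int :=
  match ov.get? p.1 with
  | none => ov.insert p.1 p.2
  | some x => ov.insert p.1 (x + p.2)

def average_for_all_channels (all_channel_data : List (String × List (String × Int))) : List (String × Int) :=
  (all_channel_data.foldl (fun overall channel => channel.2.foldl pvStepA overall) PySem.Dict.empty).items

-- ===== PORT B =====
def average_for_all_channels_alt (all_channel_data : List (String × List (String × Int))) : List (String × Int) :=
  let channels := all_channel_data.map Prod.snd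
  let aspects := PySem.List.dedup (channels.flatMap (fun channel_data => channel_data.map Prod.fst))
  aspects.map (fun a => (a, (channels.filterMap (fun channel_data => channel_data.lookup a)).sum))

-- ===== PRECONDITION & SPEC =====
-- Pre_ excludes inner association lists with duplicate aspect keys: the argument is a Python dict of dicts,
-- which cannot hold duplicate keys, so such lists represent no Python input.
def Pre_average_for_all_channels (all_channel_data : List (String × List (String × Int))) : Prop :=
  ∀ channel ∈ all_channel_data, (channel.2.map Prod.fst).Nodup
instance (all_channel_data : List (String × List (String × Int))) : Decidable (Pre_average_for_all_channels all_channel_data) := by unfold Pre_average_for_all_channels; infer_instance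

def pvWitness_average_for_all_channels : (List (String × List (String × Int))) :=
  [("web", [("food", 3), ("service", 1)]), ("app", [("service", 2)])]

def Spec_average_for_all_channels (all_channel_data : List (String × List (String × Int))) (out : List (String × Int)) : Prop := out = average_for_all_channels_alt all_channel_data
instance (all_channel_data : List (String × List (String × Int))) (out : List (String × Int)) : Decidable (Spec_average_for_all_channels all_channel_data out) := by unfold Spec_average_for_all_channels; infer_instance

-- ===== CLAIM (what is proved, stated in full; the proofs are below) =====
def Claim_equal_average_for_all_channels : Prop := ∀ (all_channel_data : List (String × List (String × Int))), Dom_average_for_all_channels all_channel_data → Pre_average_for_all_channels all_channel_data → Spec_average_for_all_channels all_channel_data (average_for_all_channels all_channel_data)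

-- ===== LEMMAS AND PROOFS =====

-- A's step is an insert of the running total at the pair's key.
theorem pvStepA_eq (ov : PySem.Dict String Int) (p : String × Int) :
    pvStepA ov p = ov.insert p.1 (ov.getD p.1 0 + p.2) := by
  unfold pvStepA
  rcases h : ov.get? p.1 with _ | x <;>
    simp [PySem.Dict.getD_eq_get?_getD, h]

theorem pvFoldA_eq (l : List (String × Int)) (ov : PySem.Dict String Int) :
    l.foldl pvStepA ov = l.foldl (fun ov p => ov.insert p.1 (ov.getD p.1 0 + p.2)) ov := by
  induction l generalizing ov with
  | nil => rfl
  | cons p l ih => simp [List.foldl_cons, pvStepA_eq, ih]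

theorem pvFoldA_getD (l : List (String × Int)) (ov : PySem.Dict String Int) (a : String) :
    (l.foldl (fun ov p => ov.insert p.1 (ov.getD p.1 0 + p.2)) ov).getD a 0
      = ov.getD a 0 + ((l.filter (fun p => p.1 == a)).map Prod.snd).sum := by
  induction l generalizing ov with
  | nil => simp
  | cons p l ih =>
    simp only [List.foldl_cons, ih, List.filter_cons]
    by_cases h : p.1 = a
    · subst h
      simp
      ring
    · simp [PySem.Dict.getD_insert, h, Ne.symm h]

-- lookup in a duplicate-free association list = sum of the values filed under that key
theorem pvLookup_sum (l : List (String × Int)) (a : String)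
    (h : (l.map Prod.fst).Nodup) :
    ((l.filter (fun p => p.1 == a)).map Prod.snd).sum = (l.lookup a).getD 0 := by
  induction l with
  | nil => simp
  | cons p l ih =>
    obtain ⟨k, v⟩ := p
    simp only [List.map_cons, List.nodup_cons] at h
    by_cases hk : k = a
    · subst hk
      have hnil : l.filter (fun q => q.1 == k) = [] := by
        apply List.filter_eq_nil_iff.mpr
        intro q hq hq'
        exact h.1 (List.mem_map.mpr ⟨q, hq, by simpa using hq'⟩)
      simp [hnil]
    · have hka : (a == k) = false := by simpa using Ne.symm hk
      simp only [List.filter_cons, List.lookup_cons, beq_iff_eq, hk, if_false, hka]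
      exact ih h.2

-- B's per-aspect sum as a sum over the flattened pair list
theorem pvSum_flat (d : List (String × List (String × Int))) (a : String)
    (hpre : ∀ channel ∈ d, (channel.2.map Prod.fst).Nodup) :
    (d.filterMap (fun channel => channel.2.lookup a)).sum
      = (((d.flatMap (fun ch => ch.2)).filter (fun p => p.1 == a)).map Prod.snd).sum := by
  induction d with
  | nil => simp
  | cons ch d ih =>
    have hch := hpre ch (by simp)
    have ih' := ih (fun c hc => hpre c (by simp [hc]))
    simp only [List.flatMap_cons, List.filter_append, List.map_append, List.sum_append,
      List.filterMap_cons]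
    rw [pvLookup_sum ch.2 a hch, ← ih']
    rcases h : ch.2.lookup a with _ | v <;> simp

-- ===== VERDICT (by name: the statement is the Claim_ definition above) =====
theorem average_for_all_channels_spec : Claim_equal_average_for_all_channels := by
  intro d _ hpre
  unfold Spec_average_for_all_channels average_for_all_channels average_for_all_channels_alt
  simp only [List.flatMap_map, List.filterMap_map, Function.comp_def]
  have hflat : d.foldl (fun overall channel => channel.2.foldl pvStepA overall) PySem.Dict.empty
      = (d.flatMap (fun ch => ch.2)).foldl pvStepA PySem.Dict.empty := by
    exact (List.foldl_flatMap ..).symm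
  set pairs := d.flatMap (fun ch => ch.2) with hpairs
  rw [hflat, pvFoldA_eq]
  have hnd : ((pairs.foldl (fun ov p => ov.insert p.1 (ov.getD p.1 0 + p.2)) PySem.Dict.empty)).keys.Nodup := by
    exact PySem.Dict.nodup_keys_foldl_insert_key pairs Prod.fst _ _ (by simp)
  rw [PySem.Dict.items_eq_map_keys _ hnd 0]
  have hkeys : (pairs.foldl (fun ov p => ov.insert p.1 (ov.getD p.1 0 + p.2)) PySem.Dict.empty).keys
      = PySem.Set.ofList (pairs.map Prod.fst) := by
    rw [PySem.Dict.keys_foldl_insert_key]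
    simp [PySem.Set.update_nil_left]
  have haspects : PySem.List.dedup (d.flatMap (fun channel => channel.2.map Prod.fst))
      = PySem.Set.ofList (pairs.map Prod.fst) := by
    rw [PySem.List.dedup_eq_ofList, hpairs, List.map_flatMap]
  rw [hkeys, ← haspects]
  apply List.map_congr_left
  intro a _
  rw [pvFoldA_getD, pvSum_flat d a hpre]
  simp [hpairs]
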